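-- pv_equiv track=rewrite | github.com/jclements3/trefoil | scripts/optimize_harp_voicings.py | voicing_score
-- ===== SOURCE A (Python) =====
-- MAX_HAND_SPAN = 12  # max diatonic strings reachable in one hand
--
-- def diatonic_span(midi_lo, midi_hi, scale_midis):
--     """Count diatonic strings between two MIDI values (inclusive)."""
--     return sum(1 for m in scale_midis if midi_lo <= m <= midi_hi)
--
-- def voicing_score(midis, scale_midis):
--     """Score a voicing. Higher = better.
--     Rewards: wider intervals (3rds, 5ths), good spread.
--     Penalizes: clusters, minor 2nds, span > MAX_HAND_SPAN."""
--     if len(midis) < 2: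
--         return 0
--     score = 0
--     sorted_m = sorted(midis)
--
--     # Interval quality between adjacent notes
--     for i in range(len(sorted_m) - 1):
--         interval = sorted_m[i + 1] - sorted_m[i]
--         span = diatonic_span(sorted_m[i], sorted_m[i + 1], scale_midis)
--         if span == 2:  # adjacent strings = minor/major 2nd
--             score -= 3
--         elif span == 3:  # 3rd
--             score += 2
--         elif span == 4:  # 4th
--             score += 1
--         elif span == 5:  # 5th
--             score += 2
--         elif span >= 6:  # 6th+
--             score += 1
--
--     # Check for 3-note clusters (3 notes within 4 diatonic steps)
--     for i in range(len(sorted_m) - 2):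
--         span = diatonic_span(sorted_m[i], sorted_m[i + 2], scale_midis)
--         if span <= 4:
--             score -= 5
--
--     # Total hand span penalty
--     total_span = diatonic_span(sorted_m[0], sorted_m[-1], scale_midis)
--     if total_span > MAX_HAND_SPAN:
--         score -= (total_span - MAX_HAND_SPAN) * 10  # heavy penalty
--
--     return score
-- ===== SOURCE B (Python) =====
-- MAX_HAND_SPAN = 12  # max diatonic strings reachable in one hand
--
-- # bonus per adjacent-pair diatonic span (span >= 6 handled by default below)
-- _INTERVAL_BONUS = {2: -3, 3: 2, 4: 1, 5: 2}
--
--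
-- def _bisect_left(a, x):
--     """First index i with a[i] >= x, for sorted a (bisect.bisect_left)."""
--     lo, hi = 0, len(a)
--     while lo < hi:
--         mid = (lo + hi) // 2
--         if a[mid] < x:
--             lo = mid + 1
--         else:
--             hi = mid
--     return lo
--
--
-- def _bisect_right(a, x):
--     """First index i with a[i] > x, for sorted a (bisect.bisect_right)."""
--     lo, hi = 0, len(a)
--     while lo < hi:
--         mid = (lo + hi) // 2
--         if x < a[mid]:
--             hi = mid
--         else:
--             lo = mid + 1
--     return lo
--
--
-- def voicing_score(midis, scale_midis):
--     if len(midis) < 2: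
--         return 0
--     sm = sorted(midis)
--     ss = sorted(scale_midis)
--     # rank each note once via binary search; a span [sm[i], sm[j]] then
--     # contains exactly highs[j] - lows[i] scale notes (sm is sorted).
--     lows = [_bisect_left(ss, m) for m in sm]
--     highs = [_bisect_right(ss, m) for m in sm]
--     n = len(sm)
--     score = 0
--     for i in range(n - 1):
--         span = highs[i + 1] - lows[i]
--         score += _INTERVAL_BONUS.get(span, 1 if span >= 6 else 0)
--     for i in range(n - 2):
--         if highs[i + 2] - lows[i] <= 4:
--             score -= 5
--     total = highs[-1] - lows[0]
--     if total > MAX_HAND_SPAN: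
--         score -= (total - MAX_HAND_SPAN) * 10
--     return score
-- ===== Notes on version B (the rewrite author's own statement) =====
-- stated objective: faster
-- what changed: Instead of rescanning the whole scale list for every adjacent pair, 3-note window and the total span (O(n*S) scans), B sorts the scale once and computes each note's rank with hand-written binary searches (bisect_left/bisect_right), so every diatonic span is a difference of two precomputed ranks; the interval bonus becomes a dict lookup.
import Mathlib
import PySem

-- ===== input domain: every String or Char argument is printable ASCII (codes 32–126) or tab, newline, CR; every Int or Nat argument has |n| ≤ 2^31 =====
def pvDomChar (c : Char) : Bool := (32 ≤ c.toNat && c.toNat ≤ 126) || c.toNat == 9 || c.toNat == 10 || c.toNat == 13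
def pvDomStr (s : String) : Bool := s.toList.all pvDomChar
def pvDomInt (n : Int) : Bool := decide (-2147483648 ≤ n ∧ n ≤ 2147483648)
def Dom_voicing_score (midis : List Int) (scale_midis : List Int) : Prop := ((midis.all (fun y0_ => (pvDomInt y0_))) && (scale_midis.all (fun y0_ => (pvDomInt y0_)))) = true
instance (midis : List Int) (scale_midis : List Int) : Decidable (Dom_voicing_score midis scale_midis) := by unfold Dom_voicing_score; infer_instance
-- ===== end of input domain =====

-- B replaces A's per-pair rescans of the scale list by one sort of the scale plus
-- binary-search ranks (asymptotically faster); return value proved identical.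

-- ===== PORT A =====
-- sum(1 for m in scale_midis if midi_lo <= m <= midi_hi)  (a 0/1-generator sum = countP)
def pvDiatonicSpan (midi_lo midi_hi : Int) (scale_midis : List Int) : Int :=
  ((scale_midis.countP (fun m => decide (midi_lo ≤ m ∧ m ≤ midi_hi)) : Nat) : Int)

def voicing_score (midis : List Int) (scale_midis : List Int) : Int :=
  if midis.length < 2 then 0
  else
    let sorted_m := PySem.List.sorted midis (fun x => x) false
    -- for i in range(len(sorted_m) - 1): interval-quality chain
    let score1 := (List.range (sorted_m.length - 1)).foldl (fun score i =>
      let span := pvDiatonicSpan (sorted_m.getD i 0) (sorted_m.getD (i + 1) 0) scale_midis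
      if span = 2 then score - 3
      else if span = 3 then score + 2
      else if span = 4 then score + 1
      else if span = 5 then score + 2
      else if 6 ≤ span then score + 1
      else score) 0
    -- for i in range(len(sorted_m) - 2): 3-note clusters
    let score2 := (List.range (sorted_m.length - 2)).foldl (fun score i =>
      if pvDiatonicSpan (sorted_m.getD i 0) (sorted_m.getD (i + 2) 0) scale_midis ≤ 4 then score - 5
      else score) score1
    -- total hand span penalty (sorted_m[-1] is Python negative indexing)
    let total_span := pvDiatonicSpan (sorted_m.getD 0 0) (PySem.List.pyGetD sorted_m (-1) 0) scale_midis
    if total_span > 12 then score2 - (total_span - 12) * 10 else score2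

-- ===== PORT B =====
-- _INTERVAL_BONUS.get(span, 1 if span >= 6 else 0) with the literal dict {2: -3, 3: 2, 4: 1, 5: 2}
def pvIntervalBonus (span : Int) : Int :=
  if span = 2 then -3
  else if span = 3 then 2
  else if span = 4 then 1
  else if span = 5 then 2
  else if 6 ≤ span then 1
  else 0

def voicing_score_alt (midis : List Int) (scale_midis : List Int) : Int :=
  if midis.length < 2 then 0
  else
    let sm := PySem.List.sorted midis (fun x => x) false
    let ss := PySem.List.sorted scale_midis (fun x => x) false
    -- _bisect_left/_bisect_right in Source B are verbatim the standard bisect loops,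
    -- ported as the PySem primitives of the same algorithm
    let lows := sm.map (fun m => (PySem.List.bisectLeft ss m : Int))
    let highs := sm.map (fun m => (PySem.List.bisectRight ss m : Int))
    let n := sm.length
    let score1 := (List.range (n - 1)).foldl (fun score i =>
      score + pvIntervalBonus (highs.getD (i + 1) 0 - lows.getD i 0)) 0
    let score2 := (List.range (n - 2)).foldl (fun score i =>
      if highs.getD (i + 2) 0 - lows.getD i 0 ≤ 4 then score - 5 else score) score1
    let total := PySem.List.pyGetD highs (-1) 0 - lows.getD 0 0
    if total > 12 then score2 - (total - 12) * 10 else score2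

-- ===== PRECONDITION & SPEC =====
def Spec_voicing_score (midis : List Int) (scale_midis : List Int) (out : Int) : Prop := out = voicing_score_alt midis scale_midis
instance (midis : List Int) (scale_midis : List Int) (out : Int) : Decidable (Spec_voicing_score midis scale_midis out) := by unfold Spec_voicing_score; infer_instance

-- ===== CLAIM (what is proved, stated in full; the proofs are below) =====
def Claim_equal_voicing_score : Prop := ∀ (midis : List Int) (scale_midis : List Int), Dom_voicing_score midis scale_midis → Spec_voicing_score midis scale_midis (voicing_score midis scale_midis)

-- ===== LEMMAS AND PROOFS =====

theorem pv_countP_eq_of_split (xs : List Int) (p : Int → Bool) (k : Nat) (hk : k ≤ xs.length)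
    (h1 : ∀ (j : Nat) (hj : j < xs.length), j < k → p xs[j] = true)
    (h2 : ∀ (j : Nat) (hj : j < xs.length), k ≤ j → p xs[j] = false) :
    xs.countP p = k := by
  have hsplit : xs.take k ++ xs.drop k = xs := List.take_append_drop k xs
  have htake : (xs.take k).countP p = k := by
    have hall : ∀ a ∈ xs.take k, p a = true := by
      intro a ha
      rw [List.mem_take_iff_getElem] at ha
      obtain ⟨i, hi, rfl⟩ := ha
      exact h1 i (by omega) (by omega)
    rw [List.countP_eq_length.2 hall, List.length_take]
    omega
  have hdrop : (xs.drop k).countP p = 0 := by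
    rw [List.countP_eq_zero]
    intro a ha
    rw [List.mem_drop_iff_getElem] at ha
    obtain ⟨i, hi, rfl⟩ := ha
    simp [h2 (k + i) (by omega) (by omega)]
  calc xs.countP p = (xs.take k ++ xs.drop k).countP p := by rw [hsplit]
    _ = k := by rw [List.countP_append, htake, hdrop]; omega

theorem pv_bisectLeft_count (xs : List Int) (x : Int) (h : List.Pairwise (· ≤ ·) xs) :
    PySem.List.bisectLeft xs x = xs.countP (fun m => decide (m < x)) := by
  obtain ⟨hk, hlt, hge⟩ := PySem.List.bisectLeft_spec xs x h
  refine (pv_countP_eq_of_split xs _ _ hk ?_ ?_).symm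
  · intro j hj hjk; simpa using hlt j hj hjk
  · intro j hj hjk; simpa using hge j hj hjk

theorem pv_bisectRight_count (xs : List Int) (x : Int) (h : List.Pairwise (· ≤ ·) xs) :
    PySem.List.bisectRight xs x = xs.countP (fun m => decide (m ≤ x)) := by
  obtain ⟨hk, hle, hgt⟩ := PySem.List.bisectRight_spec xs x h
  refine (pv_countP_eq_of_split xs _ _ hk ?_ ?_).symm
  · intro j hj hjk; simpa using hle j hj hjk
  · intro j hj hjk; simp only [decide_eq_false_iff_not, not_le]; exact hgt j hj hjk

theorem pv_countP_split (l : List Int) (lo hi : Int) (h : lo ≤ hi) :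
    l.countP (fun m => decide (m ≤ hi))
      = l.countP (fun m => decide (m < lo)) + l.countP (fun m => decide (lo ≤ m ∧ m ≤ hi)) := by
  induction l with
  | nil => simp
  | cons a t ih =>
    simp only [List.countP_cons, ih, Bool.decide_and]
    by_cases h1 : a ≤ hi <;> by_cases h2 : a < lo <;> by_cases h3 : lo ≤ a <;>
      simp [h1, h2, h3] <;> omega

theorem pv_span_bridge (scale : List Int) (lo hi : Int) (h : lo ≤ hi) :
    pvDiatonicSpan lo hi scale
      = ((PySem.List.bisectRight (PySem.List.sorted scale (fun x => x) false) hi : Nat) : Int)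
        - ((PySem.List.bisectLeft (PySem.List.sorted scale (fun x => x) false) lo : Nat) : Int) := by
  have hpw : List.Pairwise (· ≤ ·) (PySem.List.sorted scale (fun x => x) false) :=
    PySem.List.sorted_pairwise scale (fun x => x)
  have hperm := PySem.List.sorted_perm scale (fun x => x) false
  rw [pv_bisectLeft_count _ _ hpw, pv_bisectRight_count _ _ hpw,
      hperm.countP_eq, hperm.countP_eq]
  unfold pvDiatonicSpan
  have := pv_countP_split scale lo hi h
  omega

-- ===== VERDICT (by name: the statement is the Claim_ definition above) =====
theorem voicing_score_spec : Claim_equal_voicing_score := by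
  intro midis scale _
  unfold Spec_voicing_score voicing_score voicing_score_alt
  by_cases hlen : midis.length < 2
  · simp [hlen]
  · simp only [hlen, if_false]
    set sm := PySem.List.sorted midis (fun x => x) false with hsm
    set ss := PySem.List.sorted scale (fun x => x) false with hss
    set lows := sm.map (fun m => (PySem.List.bisectLeft ss m : Int)) with hlows
    set highs := sm.map (fun m => (PySem.List.bisectRight ss m : Int)) with hhighs
    have hn : 2 ≤ sm.length := by
      rw [hsm, PySem.List.length_sorted]; omega
    -- the span bridge at concrete indices
    have hspan : ∀ i j : Nat, i ≤ j → j < sm.length →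
        pvDiatonicSpan (sm.getD i 0) (sm.getD j 0) scale
          = highs.getD j 0 - lows.getD i 0 := by
      intro i j hij hj
      have hi : i < sm.length := lt_of_le_of_lt (le_of_eq rfl) (by omega)
      have hgd : sm.getD i 0 = sm[i] := List.getD_eq_getElem sm 0 (by omega)
      have hgd' : sm.getD j 0 = sm[j] := List.getD_eq_getElem sm 0 hj
      have hmono : sm[i] ≤ sm[j] := PySem.List.sorted_id_getElem_mono midis hij hj
      have hLg : lows.getD i 0 = (PySem.List.bisectLeft ss sm[i] : Int) := by
        rw [hlows, List.getD_eq_getElem _ 0 (by simpa using (by omega : i < sm.length)), List.getElem_map]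
      have hHg : highs.getD j 0 = (PySem.List.bisectRight ss sm[j] : Int) := by
        rw [hhighs, List.getD_eq_getElem _ 0 (by simpa using hj), List.getElem_map]
      rw [hgd, hgd', hLg, hHg, pv_span_bridge scale _ _ hmono]
    -- first fold
    have hfold1 : (List.range (sm.length - 1)).foldl (fun score i =>
        let span := pvDiatonicSpan (sm.getD i 0) (sm.getD (i + 1) 0) scale
        if span = 2 then score - 3
        else if span = 3 then score + 2
        else if span = 4 then score + 1
        else if span = 5 then score + 2
        else if 6 ≤ span then score + 1
        else score) 0
      = (List.range (sm.length - 1)).foldl (fun score i =>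
        score + pvIntervalBonus (highs.getD (i + 1) 0 - lows.getD i 0)) 0 := by
      apply PySem.List.foldl_congr_mem
      intro acc i hi
      rw [List.mem_range] at hi
      rw [← hspan i (i+1) (by omega) (by omega)]
      unfold pvIntervalBonus
      dsimp only
      split_ifs <;> omega
    rw [hfold1]
    -- second fold
    have hfold2 : ∀ init : Int, (List.range (sm.length - 2)).foldl (fun score i =>
        if pvDiatonicSpan (sm.getD i 0) (sm.getD (i + 2) 0) scale ≤ 4 then score - 5 else score) init
      = (List.range (sm.length - 2)).foldl (fun score i =>
        if highs.getD (i + 2) 0 - lows.getD i 0 ≤ 4 then score - 5 else score) init := by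
      intro init
      apply PySem.List.foldl_congr_mem
      intro acc i hi
      rw [List.mem_range] at hi
      rw [hspan i (i+2) (by omega) (by omega)]
    rw [hfold2]
    -- total span
    have hlast : PySem.List.pyGetD sm (-1) 0 = sm.getD (sm.length - 1) 0 := by
      unfold PySem.List.pyGetD
      rw [PySem.List.pyGet?_neg_one, List.getLast?_eq_getElem?]
      rw [List.getD_eq_getElem sm 0 (by omega), List.getElem?_eq_getElem (by omega)]
      rfl
    have htot : pvDiatonicSpan (sm.getD 0 0) (PySem.List.pyGetD sm (-1) 0) scale
        = PySem.List.pyGetD highs (-1) 0 - lows.getD 0 0 := by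
      have hlh : PySem.List.pyGetD highs (-1) 0 = highs.getD (highs.length - 1) 0 := by
        unfold PySem.List.pyGetD
        have : 1 ≤ highs.length := by rw [hhighs]; simp; omega
        rw [PySem.List.pyGet?_neg_one, List.getLast?_eq_getElem?]
        rw [List.getD_eq_getElem highs 0 (by omega), List.getElem?_eq_getElem (by omega)]
        rfl
      have hlh2 : highs.length - 1 = sm.length - 1 := by rw [hhighs]; simp
      rw [hlast, hlh, hlh2, hspan 0 (sm.length - 1) (by omega) (by omega)]
    rw [htot]
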